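-- pv_equiv track=rewrite | github.com/jsphweid/learning-circuits | n2t/compiler/vm_writer.py | _make_rpn_indicies
-- ===== SOURCE A (Python) =====
-- from typing import List, Union
--
-- def _make_rpn_indicies(length: int) -> List[int]:
--     """
--     turns this...
--     AxAxAxA
--     0,2,4,6
--
--     into
--     AAxAxAx
--     0214365
--     """
--     ret = []
--     for i in range(length):
--         if i == 0:
--             ret.append(0)
--         else:
--             ret.append((i - 1) if i % 2 == 0 else (i + 1))
--     return ret
-- ===== SOURCE B (Python) =====
-- from typing import List, Union
--
-- def _make_rpn_indicies(length: int) -> List[int]: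
--     ret = [0]
--     k = 1
--     while len(ret) < length:
--         ret.append(k + 1)
--         ret.append(k)
--         k += 2
--     return ret[:length]
-- ===== Notes on version B (the rewrite author's own statement) =====
-- stated objective: alternative
-- what changed: B builds the sequence by appending swapped pairs (k+1, k) in a while loop until long enough and then truncates with a slice, instead of A's per-index parity formula over range(length).
import Mathlib
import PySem

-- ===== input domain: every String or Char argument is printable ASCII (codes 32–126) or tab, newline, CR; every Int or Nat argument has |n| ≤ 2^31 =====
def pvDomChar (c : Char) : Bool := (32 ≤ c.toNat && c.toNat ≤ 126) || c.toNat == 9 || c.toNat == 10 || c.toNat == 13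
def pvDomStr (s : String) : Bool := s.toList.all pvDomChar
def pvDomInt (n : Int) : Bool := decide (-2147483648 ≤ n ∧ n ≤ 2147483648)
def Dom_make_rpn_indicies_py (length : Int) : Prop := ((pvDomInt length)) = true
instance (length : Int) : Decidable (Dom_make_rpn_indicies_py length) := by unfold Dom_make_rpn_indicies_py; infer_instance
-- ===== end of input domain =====

-- B builds the sequence by appending swapped pairs (k+1, k) until long enough and then truncates
-- with a slice, instead of A's per-index parity formula; an alternative decomposition, same cost.

-- ===== PORT A =====
def make_rpn_indicies_py (length : Int) : List Int :=
  (PySem.List.pyRange 0 length 1).foldl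
    (fun ret i =>
      if i == 0 then ret ++ [0]
      else ret ++ [if PySem.Int.mod i 2 == 0 then i - 1 else i + 1]) []

-- ===== PORT B =====
-- the while loop of Source B; terminates because each pass grows ret by 2 toward length
def make_rpn_indicies_py_altLoop (length : Int) (ret : List Int) (k : Int) : List Int :=
  if (ret.length : Int) < length then
    make_rpn_indicies_py_altLoop length (ret ++ [k + 1] ++ [k]) (k + 2)
  else ret
termination_by length.toNat - ret.length
decreasing_by simp; omega

def make_rpn_indicies_py_alt (length : Int) : List Int :=
  PySem.List.slice (make_rpn_indicies_py_altLoop length [0] 1) none (some length)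

-- ===== PRECONDITION & SPEC =====
def Spec_make_rpn_indicies_py (length : Int) (out : List Int) : Prop := out = make_rpn_indicies_py_alt length
instance (length : Int) (out : List Int) : Decidable (Spec_make_rpn_indicies_py length out) := by unfold Spec_make_rpn_indicies_py; infer_instance

-- ===== CLAIM (what is proved, stated in full; the proofs are below) =====
def Claim_equal_make_rpn_indicies_py : Prop := ∀ (length : Int), Dom_make_rpn_indicies_py length → Spec_make_rpn_indicies_py length (make_rpn_indicies_py length)

-- ===== LEMMAS AND PROOFS =====

-- the common value stream: 0, 2, 1, 4, 3, 6, 5, …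
def pvF (i : Nat) : Int := if i = 0 then 0 else if i % 2 = 0 then (i : Int) - 1 else (i : Int) + 1
def pvStream (n : Nat) : List Int := (List.range n).map pvF

lemma pvStream_length (n : Nat) : (pvStream n).length = n := by simp [pvStream]

lemma pvStream_succ (n : Nat) : pvStream (n + 1) = pvStream n ++ [pvF n] := by
  simp [pvStream, List.range_succ]

lemma pvStream_take {n M : Nat} (h : n ≤ M) : (pvStream M).take n = pvStream n := by
  simp [pvStream, ← List.map_take, List.take_range, Nat.min_eq_left h]

lemma pvA_eq_stream (length : Int) : make_rpn_indicies_py length = pvStream length.toNat := by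
  unfold make_rpn_indicies_py
  have hbody : (fun (ret : List Int) (i : Int) =>
      if i == 0 then ret ++ [0]
      else ret ++ [if PySem.Int.mod i 2 == 0 then i - 1 else i + 1])
      = fun ret i => ret ++ [if i == 0 then 0 else if PySem.Int.mod i 2 == 0 then i - 1 else i + 1] := by
    funext ret i
    by_cases h : i == 0 <;> simp [h]
  rw [hbody, PySem.List.pyRange_one, PySem.List.foldl_append_singleton_eq_map]
  simp only [List.nil_append, List.map_map, pvStream, Int.sub_zero]
  apply List.map_congr_left
  intro k _
  simp only [Function.comp, zero_add, pvF]
  by_cases hk : k = 0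
  · simp [hk]
  · have h2 : PySem.Int.mod (k : Int) 2 = ((k % 2 : Nat) : Int) := PySem.Int.mod_natCast k 2
    by_cases hp : k % 2 = 0
    · simp [hk, hp]
      omega
    · simp [hk, hp]
      omega

lemma pvLoop_aux (length : Int) : ∀ (d m : Nat), m % 2 = 1 → length.toNat ≤ m + d →
    ∃ M, length.toNat ≤ M ∧ m ≤ M ∧
      make_rpn_indicies_py_altLoop length (pvStream m) (m : Int) = pvStream M := by
  intro d
  induction d with
  | zero =>
    intro m hm hle
    refine ⟨m, by omega, le_refl m, ?_⟩
    rw [make_rpn_indicies_py_altLoop, if_neg (by rw [pvStream_length]; omega)]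
  | succ d ih =>
    intro m hm hle
    by_cases hstop : length.toNat ≤ m
    · refine ⟨m, hstop, le_refl m, ?_⟩
      rw [make_rpn_indicies_py_altLoop, if_neg (by rw [pvStream_length]; omega)]
    · have hpair : pvStream m ++ [(m : Int) + 1] ++ [(m : Int)] = pvStream (m + 2) := by
        have h1 : pvF m = (m : Int) + 1 := by simp [pvF]; omega
        have h2 : pvF (m + 1) = (m : Int) := by
          have he : (m + 1) % 2 = 0 := by omega
          simp [pvF, he]
        rw [pvStream_succ, pvStream_succ, h1, h2]
      obtain ⟨M, hM1, hM2, hM3⟩ := ih (m + 2) (by omega) (by omega)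
      refine ⟨M, hM1, by omega, ?_⟩
      rw [make_rpn_indicies_py_altLoop, if_pos (by rw [pvStream_length]; omega), hpair]
      have : ((m : Int) + 2) = ((m + 2 : Nat) : Int) := by push_cast; ring
      rw [this, hM3]

lemma pvLoop_eq_stream (length : Int) :
    ∃ M, length.toNat ≤ M ∧ make_rpn_indicies_py_altLoop length [0] 1 = pvStream M := by
  have h1 : pvStream 1 = [0] := by simp [pvStream, pvF]
  obtain ⟨M, hM1, _, hM3⟩ := pvLoop_aux length length.toNat 1 rfl (by omega)
  exact ⟨M, by omega, by rw [← h1]; exact_mod_cast hM3⟩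

-- ===== VERDICT (by name: the statement is the Claim_ definition above) =====
theorem make_rpn_indicies_py_spec : Claim_equal_make_rpn_indicies_py := by
  intro length _
  unfold Spec_make_rpn_indicies_py make_rpn_indicies_py_alt
  obtain ⟨M, hM, hloop⟩ := pvLoop_eq_stream length
  rw [hloop, pvA_eq_stream]
  by_cases h : 0 ≤ length
  · rw [PySem.List.slice_to _ h, pvStream_take hM]
  · have h0 : length.toNat = 0 := by omega
    rw [← hloop, make_rpn_indicies_py_altLoop, if_neg (by simp; omega), h0]
    simp only [pvStream, List.range_zero, List.map_nil, PySem.List.slice, PySem.List.clampIdx]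
    split_ifs <;> (simp_all; try omega)
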